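-- pv_equiv track=rewrite | github.com/0eai/Expand_And_Shrink | src/client.py | get_H
-- ===== SOURCE A (Python) =====
-- def get_H(RH):
--     H = []
--     for i in range(256):
--         if i in RH.keys():
--             H.append(RH[i])
--         else:
--             H.append(0)
--     return H
-- ===== SOURCE B (Python) =====
-- def get_H(RH):
--     H = [0] * 256
--     for k, v in RH.items():
--         if 0 <= k < 256:
--             H[k] = v
--     return H
-- ===== Notes on version B (the rewrite author's own statement) =====
-- stated objective: simpler
-- what changed: B pre-zeroes a 256-slot array and scatters the dict's items into it by key, instead of scanning all 256 indices with a membership test and appending; the per-index dict lookup disappears.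
import Mathlib
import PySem

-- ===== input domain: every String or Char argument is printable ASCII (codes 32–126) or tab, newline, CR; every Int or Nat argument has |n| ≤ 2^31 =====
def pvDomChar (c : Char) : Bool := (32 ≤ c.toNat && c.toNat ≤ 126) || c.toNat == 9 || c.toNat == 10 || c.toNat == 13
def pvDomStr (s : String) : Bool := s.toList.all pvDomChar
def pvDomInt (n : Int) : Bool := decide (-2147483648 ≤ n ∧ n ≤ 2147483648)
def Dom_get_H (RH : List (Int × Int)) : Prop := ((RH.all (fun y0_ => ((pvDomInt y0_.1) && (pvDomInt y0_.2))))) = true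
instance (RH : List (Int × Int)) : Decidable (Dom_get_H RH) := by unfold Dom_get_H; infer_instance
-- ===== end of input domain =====

-- B replaces A's scan of all 256 indices (with a per-index dict membership test and append)
-- by a pre-zeroed 256-slot array into which the dict's items are scattered by key. (objective: simpler)

-- ===== PORT A =====
def get_H (RH : List (Int × Int)) : List Int :=
  let d := PySem.Dict.ofList RH
  (PySem.List.pyRange 0 256 1).foldl
    (fun H i => if d.keys.contains i then H ++ [d.getD i 0] else H ++ [0]) []

-- ===== PORT B =====
def get_H_alt (RH : List (Int × Int)) : List Int :=
  RH.foldl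
    (fun H kv => if 0 ≤ kv.1 ∧ kv.1 < 256 then H.set kv.1.toNat kv.2 else H)
    (List.replicate 256 0)

-- ===== PRECONDITION & SPEC =====
def Spec_get_H (RH : List (Int × Int)) (out : List Int) : Prop := out = get_H_alt RH
instance (RH : List (Int × Int)) (out : List Int) : Decidable (Spec_get_H RH out) := by unfold Spec_get_H; infer_instance

-- ===== CLAIM (what is proved, stated in full; the proofs are below) =====
def Claim_equal_get_H : Prop := ∀ (RH : List (Int × Int)), Dom_get_H RH → Spec_get_H RH (get_H RH)

-- ===== LEMMAS AND PROOFS =====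

-- A's append loop is a map over the range.
theorem foldl_append_ite (d : PySem.Dict Int Int) (l : List Int) (acc : List Int) :
    l.foldl (fun H i => if d.keys.contains i then H ++ [d.getD i 0] else H ++ [0]) acc
      = acc ++ l.map (fun i => if d.keys.contains i then d.getD i 0 else 0) := by
  induction l generalizing acc with
  | nil => simp
  | cons a t ih =>
    simp only [List.foldl_cons, List.map_cons]
    by_cases h : d.keys.contains a
    · rw [if_pos h, if_pos h, ih, List.append_assoc]; rfl
    · rw [if_neg h, if_neg h, ih, List.append_assoc]; rfl

-- in both branches A's element is just getD (getD of a missing key is the default 0)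
theorem elem_eq_getD (d : PySem.Dict Int Int) (i : Int) :
    (if d.keys.contains i then d.getD i 0 else 0) = d.getD i 0 := by
  split_ifs with h
  · rfl
  · rw [PySem.Dict.getD_of_not_contains]
    rw [Bool.eq_false_iff, Ne, PySem.Dict.contains_iff_mem_keys]
    simpa using h

theorem scatter_length (l : List (Int × Int)) (H : List Int) :
    (l.foldl (fun H kv => if 0 ≤ kv.1 ∧ kv.1 < 256 then H.set kv.1.toNat kv.2 else H) H).length
      = H.length := by
  induction l generalizing H with
  | nil => rfl
  | cons p t ih => simp only [List.foldl_cons]; split_ifs <;> simp [ih]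

theorem ofList_append_singleton (l : List (Int × Int)) (p : Int × Int) :
    PySem.Dict.ofList (l ++ [p]) = (PySem.Dict.ofList l).insert p.1 p.2 := by
  simp [PySem.Dict.ofList, PySem.Dict.update, List.foldl_append]

-- scatter at index i reads as the dict lookup, falling back to the initial array
theorem scatter_getElem (l : List (Int × Int)) (H : List Int) (hH : H.length = 256)
    (i : Nat) (hi : i < 256) :
    (l.foldl (fun H kv => if 0 ≤ kv.1 ∧ kv.1 < 256 then H.set kv.1.toNat kv.2 else H) H)[i]?
      = ((PySem.Dict.ofList l).get? (i : Int)).orElse (fun _ => H[i]?) := by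
  induction l using List.reverseRecOn generalizing H with
  | nil =>
    simp [PySem.Dict.ofList, PySem.Dict.update, PySem.Dict.get?_empty, Option.orElse]
  | append_singleton t p ih =>
    rw [List.foldl_append, ofList_append_singleton, PySem.Dict.get?_insert]
    simp only [List.foldl_cons, List.foldl_nil]
    by_cases hk : (i : Int) = p.1
    · have h01 : 0 ≤ p.1 ∧ p.1 < 256 := by constructor <;> omega
      have htn : p.1.toNat = i := by omega
      rw [if_pos hk, if_pos h01, htn]
      rw [List.getElem?_set_self]
      · simp [Option.orElse]
      · rw [scatter_length, hH]; exact hi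
    · rw [if_neg hk]
      split_ifs with h01
      · have hne : p.1.toNat ≠ i := by omega
        rw [List.getElem?_set_ne hne, ih H hH]
      · exact ih H hH

theorem getD_eq_orElse (d : PySem.Dict Int Int) (i : Int) :
    some (d.getD i 0) = (d.get? i).orElse (fun _ => some 0) := by
  rw [PySem.Dict.getD_eq_get?_getD]
  cases d.get? i <;> simp [Option.orElse]

theorem get_H_eq_alt (RH : List (Int × Int)) : get_H RH = get_H_alt RH := by
  unfold get_H get_H_alt
  rw [foldl_append_ite]
  apply List.ext_getElem?
  intro i
  by_cases hi : i < 256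
  · rw [scatter_getElem _ _ List.length_replicate i hi]
    rw [List.nil_append, PySem.List.pyRange_one]
    have h256 : ((256 : Int) - 0).toNat = 256 := rfl
    rw [h256, List.map_map, List.getElem?_map, List.getElem?_range hi]
    simp only [Option.map_some, Function.comp_apply, zero_add]
    rw [elem_eq_getD, List.getElem?_replicate, if_pos hi]
    exact getD_eq_orElse _ _
  · rw [List.getElem?_eq_none, List.getElem?_eq_none]
    · rw [scatter_length, List.length_replicate]; omega
    · rw [List.nil_append, List.length_map, PySem.List.length_pyRange_one]; omega

-- ===== VERDICT (by name: the statement is the Claim_ definition above) =====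
theorem get_H_spec : Claim_equal_get_H := by
  intro RH _
  exact get_H_eq_alt RH
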